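-- pv_equiv track=rewrite | github.com/haochiz/PhenoPad-medterm-evaluation | run.py | count_correct
-- ===== SOURCE A (Python) =====
-- def count_correct(ref_terms_, hyp_terms_):
--     ref_terms = [term[0] for term in ref_terms_]
--     hyp_terms = [term[0] for term in hyp_terms_]
--     true_positive = 0
--     false_postive = 0
--     total_ref_terms = len(ref_terms)
--     for term in hyp_terms:
--         if term in ref_terms:
--             true_positive += 1
--             ref_terms.remove(term)
--         else:
--             false_postive += 1
--
--     return true_positive, false_postive, total_ref_terms
-- ===== SOURCE B (Python) =====
-- def count_correct(ref_terms_, hyp_terms_):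
--     # Sort both head lists, then count matches with a two-pointer merge:
--     # no membership scan, no removal, no frequency table.
--     rs = sorted(term[0] for term in ref_terms_)
--     hs = sorted(term[0] for term in hyp_terms_)
--     true_positive = 0
--     i = j = 0
--     while i < len(rs) and j < len(hs):
--         if rs[i] == hs[j]:
--             true_positive += 1
--             i += 1
--             j += 1
--         elif rs[i] < hs[j]:
--             i += 1
--         else:
--             j += 1
--     return true_positive, len(hyp_terms_) - true_positive, len(ref_terms_)
-- ===== Notes on version B (the rewrite author's own statement) =====
-- stated objective: alternative
-- what changed: Replaces the per-hypothesis membership scan with list.remove over a shrinking reference copy by sort-then-merge: both head lists are sorted and a two-pointer merge counts the multiset intersection; false positives are len(hyp) - true_positive and the inputs are never mutated.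
import Mathlib
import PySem

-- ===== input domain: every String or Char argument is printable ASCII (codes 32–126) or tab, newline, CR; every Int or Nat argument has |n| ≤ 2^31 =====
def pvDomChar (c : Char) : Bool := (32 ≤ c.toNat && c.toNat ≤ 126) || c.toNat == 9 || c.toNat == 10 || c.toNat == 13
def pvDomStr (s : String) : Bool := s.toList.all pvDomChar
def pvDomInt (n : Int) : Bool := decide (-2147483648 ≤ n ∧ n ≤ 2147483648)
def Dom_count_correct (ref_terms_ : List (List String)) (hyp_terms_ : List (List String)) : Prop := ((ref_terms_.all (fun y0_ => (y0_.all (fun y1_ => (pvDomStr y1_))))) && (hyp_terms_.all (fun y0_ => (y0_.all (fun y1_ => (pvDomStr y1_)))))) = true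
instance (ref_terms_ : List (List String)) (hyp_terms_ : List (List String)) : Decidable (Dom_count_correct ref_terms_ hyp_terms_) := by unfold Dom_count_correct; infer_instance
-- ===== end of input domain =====

-- B replaces A's membership-scan-and-remove loop by a sort-then-merge two-pointer
-- count of the multiset intersection (alternative algorithm, same result).
-- ===== PORT A =====
def count_correct (ref_terms_ : List (List String)) (hyp_terms_ : List (List String)) : Int × Int × Int :=
  -- term[0]: under Pre_ every row is nonempty, so headD "" is exact there
  let ref_terms := ref_terms_.map (fun term => term.headD "")
  let hyp_terms := hyp_terms_.map (fun term => term.headD "")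
  let total_ref_terms : Int := ref_terms.length
  let s := hyp_terms.foldl
    (fun (st : Int × Int × List String) term =>
      if term ∈ st.2.2 then (st.1 + 1, st.2.1, st.2.2.erase term)
      else (st.1, st.2.1 + 1, st.2.2))
    ((0 : Int), (0 : Int), ref_terms)
  (s.1, s.2.1, total_ref_terms)

-- ===== PORT B =====
-- the while loop of Source B: two index pointers over the two sorted lists
def pvMergeLoop (rs hs : List String) (i j : Nat) (tp : Int) : Int :=
  if h : i < rs.length ∧ j < hs.length then
    if rs[i] = hs[j] then pvMergeLoop rs hs (i + 1) (j + 1) (tp + 1)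
    else if rs[i] < hs[j] then pvMergeLoop rs hs (i + 1) j tp
    else pvMergeLoop rs hs i (j + 1) tp
  else tp
termination_by (rs.length - i) + (hs.length - j)
decreasing_by all_goals omega

def count_correct_alt (ref_terms_ : List (List String)) (hyp_terms_ : List (List String)) : Int × Int × Int :=
  let rs := PySem.List.sorted (ref_terms_.map (fun term => term.headD "")) (fun x => x) false
  let hs := PySem.List.sorted (hyp_terms_.map (fun term => term.headD "")) (fun x => x) false
  let true_positive := pvMergeLoop rs hs 0 0 0
  (true_positive, (hyp_terms_.length : Int) - true_positive, (ref_terms_.length : Int))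

-- ===== PRECONDITION & SPEC =====
-- Pre_ excludes inputs containing an empty row, on which both Pythons raise IndexError at term[0].
def Pre_count_correct (ref_terms_ : List (List String)) (hyp_terms_ : List (List String)) : Prop :=
  (∀ t ∈ ref_terms_, t ≠ []) ∧ (∀ t ∈ hyp_terms_, t ≠ [])
instance (ref_terms_ : List (List String)) (hyp_terms_ : List (List String)) : Decidable (Pre_count_correct ref_terms_ hyp_terms_) := by unfold Pre_count_correct; infer_instance
def pvWitness_count_correct : List (List String) × List (List String) :=
  ([["flu"], ["cough"]], [["flu"], ["fever"]])
def Spec_count_correct (ref_terms_ : List (List String)) (hyp_terms_ : List (List String)) (out : Int × Int × Int) : Prop := out = count_correct_alt ref_terms_ hyp_terms_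
instance (ref_terms_ : List (List String)) (hyp_terms_ : List (List String)) (out : Int × Int × Int) : Decidable (Spec_count_correct ref_terms_ hyp_terms_ out) := by unfold Spec_count_correct; infer_instance

-- ===== CLAIM (what is proved, stated in full; the proofs are below) =====
def Claim_equal_count_correct : Prop := ∀ (ref_terms_ : List (List String)) (hyp_terms_ : List (List String)), Dom_count_correct ref_terms_ hyp_terms_ → Pre_count_correct ref_terms_ hyp_terms_ → Spec_count_correct ref_terms_ hyp_terms_ (count_correct ref_terms_ hyp_terms_)

-- ===== LEMMAS AND PROOFS =====

-- multiset identities used to characterise both loops as the intersection card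
theorem pv_cons_inter_cons (a : String) (s t : Multiset String) :
    (a ::ₘ s) ∩ (a ::ₘ t) = a ::ₘ (s ∩ t) := by
  ext x
  simp only [Multiset.count_inter, Multiset.count_cons]
  split_ifs <;> omega

theorem pv_cons_inter_not_mem (a : String) (s : List String) (t : Multiset String)
    (ha : a ∉ t) : ((↑(a :: s) : Multiset String)) ∩ t = (↑s : Multiset String) ∩ t := by
  ext x
  rw [← Multiset.cons_coe]
  simp only [Multiset.count_inter, Multiset.count_cons]
  by_cases hx : x = a
  · subst hx
    rw [Multiset.count_eq_zero.mpr ha]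
    simp
  · simp [hx]

theorem pv_inter_cons_not_mem (a : String) (s : Multiset String) (t : List String)
    (ha : a ∉ s) : s ∩ (↑(a :: t) : Multiset String) = s ∩ (↑t : Multiset String) := by
  ext x
  rw [← Multiset.cons_coe]
  simp only [Multiset.count_inter, Multiset.count_cons]
  by_cases hx : x = a
  · subst hx
    rw [Multiset.count_eq_zero.mpr ha]
    simp
  · simp [hx]

theorem pv_inter_cons_mem (a : String) (s : Multiset String) (t : Multiset String)
    (ha : a ∈ t) : (a ::ₘ s) ∩ t = a ::ₘ (s ∩ (t.erase a)) := by
  ext x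
  simp only [Multiset.count_inter, Multiset.count_cons]
  by_cases hx : x = a
  · subst hx
    have h1 : 1 ≤ t.count x := Multiset.one_le_count_iff_mem.mpr ha
    rw [Multiset.count_erase_self]
    have h2 : (if x = x then (1 : Nat) else 0) = 1 := if_pos rfl
    rw [h2]
    omega
  · rw [Multiset.count_erase_of_ne hx]
    simp only [if_neg hx]
    omega

-- the two-pointer merge counts the multiset intersection of the sorted suffixes
theorem pv_merge_eq (rs hs : List String) (i j : Nat) (tp : Int)
    (hr : (rs.drop i).Pairwise (· ≤ ·)) (hh : (hs.drop j).Pairwise (· ≤ ·)) :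
    pvMergeLoop rs hs i j tp
      = tp + ((((rs.drop i : List String) : Multiset String) ∩ ↑(hs.drop j)).card : Int) := by
  unfold pvMergeLoop
  split
  · rename_i h
    obtain ⟨hi, hj⟩ := h
    have hdr : rs.drop i = rs[i] :: rs.drop (i + 1) := List.drop_eq_getElem_cons hi
    have hdh : hs.drop j = hs[j] :: hs.drop (j + 1) := List.drop_eq_getElem_cons hj
    have hr' : (rs.drop (i + 1)).Pairwise (· ≤ ·) := by
      rw [hdr] at hr; exact hr.tail
    have hh' : (hs.drop (j + 1)).Pairwise (· ≤ ·) := by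
      rw [hdh] at hh; exact hh.tail
    split
    · rename_i heq
      rw [pv_merge_eq rs hs (i+1) (j+1) (tp+1) hr' hh', hdr, hdh, heq,
        ← Multiset.cons_coe, ← Multiset.cons_coe, pv_cons_inter_cons, Multiset.card_cons]
      push_cast; ring
    · split
      · rename_i hne hlt
        -- rs[i] < hs[j] ≤ every element of hs.drop j, so rs[i] ∉ hs.drop j
        have hnm : rs[i] ∉ ((hs.drop j : List String) : Multiset String) := by
          rw [hdh] at hh ⊢
          simp only [Multiset.mem_coe, List.mem_cons]
          rintro (hc | hc)
          · exact hne hc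
          · have := (List.pairwise_cons.mp hh).1 _ hc
            exact absurd (lt_of_lt_of_le hlt this) (lt_irrefl _)
        rw [pv_merge_eq rs hs (i+1) j tp hr' hh, hdr, pv_cons_inter_not_mem _ _ _ hnm]
      · rename_i hne hnlt
        have hgt : hs[j] < rs[i] := lt_of_le_of_ne (not_lt.mp hnlt) (fun hc => hne hc.symm)
        have hnm : hs[j] ∉ ((rs.drop i : List String) : Multiset String) := by
          rw [hdr] at hr ⊢
          simp only [Multiset.mem_coe, List.mem_cons]
          rintro (hc | hc)
          · exact absurd (hc ▸ hgt) (lt_irrefl _)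
          · have := (List.pairwise_cons.mp hr).1 _ hc
            exact absurd (lt_of_lt_of_le hgt this) (lt_irrefl _)
        rw [pv_merge_eq rs hs i (j+1) tp hr hh', hdh, pv_inter_cons_not_mem _ _ _ hnm]
  · rename_i hoob
    rcases Nat.lt_or_ge i rs.length with hi | hi
    · have hj : hs.length ≤ j := by omega
      rw [List.drop_eq_nil_of_le hj]
      simp
    · rw [List.drop_eq_nil_of_le hi]
      simp
termination_by (rs.length - i) + (hs.length - j)
decreasing_by all_goals omega

-- A's loop: the true-positive count is the multiset-intersection card
theorem pv_tpA (hyp : List String) (rt : List String) (tp fp : Int) :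
    (hyp.foldl
      (fun (st : Int × Int × List String) term =>
        if term ∈ st.2.2 then (st.1 + 1, st.2.1, st.2.2.erase term)
        else (st.1, st.2.1 + 1, st.2.2))
      (tp, fp, rt)).1
    = tp + ((((hyp : List String) : Multiset String) ∩ ↑rt).card : Int) := by
  induction hyp generalizing rt tp fp with
  | nil => simp
  | cons t ts ih =>
    simp only [List.foldl_cons]
    by_cases hm : t ∈ rt
    · rw [if_pos hm, ih (rt.erase t) (tp + 1) fp]
      have heq : ((↑(t :: ts) : Multiset String)) ∩ ↑rt
          = t ::ₘ ((↑ts : Multiset String) ∩ ((↑rt : Multiset String).erase t)) := by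
        rw [← Multiset.cons_coe]
        exact pv_inter_cons_mem t ↑ts ↑rt (Multiset.mem_coe.mpr hm)
      rw [heq, Multiset.card_cons, ← Multiset.coe_erase]
      push_cast; ring
    · rw [if_neg hm, ih rt tp (fp + 1),
        pv_cons_inter_not_mem t ts ↑rt (fun hc => hm (Multiset.mem_coe.mp hc))]

-- A's loop: tp + fp grows by one per hypothesis term
theorem pv_sumA (hyp : List String) (tp fp : Int) (rt : List String) :
    (hyp.foldl
      (fun (st : Int × Int × List String) term =>
        if term ∈ st.2.2 then (st.1 + 1, st.2.1, st.2.2.erase term)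
        else (st.1, st.2.1 + 1, st.2.2))
      (tp, fp, rt)).1
    + (hyp.foldl
      (fun (st : Int × Int × List String) term =>
        if term ∈ st.2.2 then (st.1 + 1, st.2.1, st.2.2.erase term)
        else (st.1, st.2.1 + 1, st.2.2))
      (tp, fp, rt)).2.1 = tp + fp + hyp.length := by
  induction hyp generalizing tp fp rt with
  | nil => simp
  | cons t ts ih =>
    simp only [List.foldl_cons, List.length_cons]
    by_cases hm : t ∈ rt
    · rw [if_pos hm]
      have := ih (tp + 1) fp (rt.erase t)
      push_cast at this ⊢; omega
    · rw [if_neg hm]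
      have := ih tp (fp + 1) rt
      push_cast at this ⊢; omega

-- ===== VERDICT (by name: the statement is the Claim_ definition above) =====
theorem count_correct_spec : Claim_equal_count_correct := by
  intro r h _ _
  unfold Spec_count_correct count_correct count_correct_alt
  dsimp only
  set rh := r.map (fun term => term.headD "") with hrh
  set hh := h.map (fun term => term.headD "") with hhh
  have hsr : (PySem.List.sorted rh (fun x => x) false).Pairwise (· ≤ ·) :=
    PySem.List.sorted_pairwise rh (fun x => x)
  have hsh : (PySem.List.sorted hh (fun x => x) false).Pairwise (· ≤ ·) :=
    PySem.List.sorted_pairwise hh (fun x => x)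
  have hm := pv_merge_eq (PySem.List.sorted rh (fun x => x) false)
      (PySem.List.sorted hh (fun x => x) false) 0 0 0
      (by simpa using hsr) (by simpa using hsh)
  simp only [List.drop_zero] at hm
  have hcr : ((PySem.List.sorted rh (fun x => x) false : List String) : Multiset String)
      = (↑rh : Multiset String) :=
    Multiset.coe_eq_coe.mpr (PySem.List.sorted_perm rh (fun x => x) false)
  have hch : ((PySem.List.sorted hh (fun x => x) false : List String) : Multiset String)
      = (↑hh : Multiset String) :=
    Multiset.coe_eq_coe.mpr (PySem.List.sorted_perm hh (fun x => x) false)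
  rw [hcr, hch, Multiset.inter_comm] at hm
  have htp := pv_tpA hh rh 0 0
  have hsum := pv_sumA hh 0 0 rh
  refine Prod.ext ?_ (Prod.ext ?_ ?_) <;> dsimp only
  · rw [htp, hm]
  · rw [hm]
    have hlen : (hh.length : Int) = (h.length : Int) := by simp [hhh]
    omega
  · simp [hrh]
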